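-- pv_equiv track=rewrite | github.com/sobrinhocdg/devil-heroin | midi_generator.py | make_counterpoint
-- ===== SOURCE A (Python) =====
-- def make_counterpoint(scale, base_progression, bars, step, length):
--     line = []
--     for i in range(bars):
--         chord_root = base_progression[i % len(base_progression)]
--         root_index = scale.index(chord_root) if chord_root in scale else 0
--         note = scale[(root_index + step) % len(scale)] + 12 * 4
--         line.append((note, length))
--     return line
-- ===== SOURCE B (Python) =====
-- def make_counterpoint(scale, base_progression, bars, step, length):
--     if bars <= 0:
--         return []
--     index = {}
--     for j, v in enumerate(scale):
--         index.setdefault(v, j)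
--     n = len(scale)
--     period = [(scale[(index.get(c, 0) + step) % n] + 12 * 4, length)
--               for c in base_progression]
--     q, r = divmod(bars, len(base_progression))
--     return period * q + period[:r]
-- ===== Notes on version B (the rewrite author's own statement) =====
-- stated objective: faster
-- what changed: Replaces the per-bar scale.index scan with a first-occurrence index dict built once, computes one progression-period of notes, and tiles it across bars with list repetition and a slice instead of recomputing each bar.
import Mathlib
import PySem

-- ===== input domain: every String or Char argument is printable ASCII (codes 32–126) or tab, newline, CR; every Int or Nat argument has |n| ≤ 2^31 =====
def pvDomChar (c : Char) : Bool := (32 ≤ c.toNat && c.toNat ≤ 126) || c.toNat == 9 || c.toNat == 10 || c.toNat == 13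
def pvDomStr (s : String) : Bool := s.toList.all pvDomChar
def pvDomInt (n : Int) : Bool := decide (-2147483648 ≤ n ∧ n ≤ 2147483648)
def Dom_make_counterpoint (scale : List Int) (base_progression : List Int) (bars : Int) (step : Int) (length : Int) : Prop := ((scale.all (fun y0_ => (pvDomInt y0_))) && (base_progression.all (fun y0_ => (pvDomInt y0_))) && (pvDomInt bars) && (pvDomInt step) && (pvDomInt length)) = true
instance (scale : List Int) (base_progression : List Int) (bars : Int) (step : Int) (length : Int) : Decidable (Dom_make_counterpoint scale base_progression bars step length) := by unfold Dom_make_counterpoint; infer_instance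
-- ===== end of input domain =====

-- B builds a first-occurrence scale-index dict once, computes one progression-period of
-- notes, and tiles it across the bars, instead of rescanning the scale for every bar.

-- ===== PORT A =====
def make_counterpoint (scale : List Int) (base_progression : List Int) (bars : Int) (step : Int) (length : Int) : List (Int × Int) :=
  (PySem.List.pyRange 0 bars 1).foldl (fun line i =>
    let chord_root := PySem.List.pyGetD base_progression (PySem.Int.mod i (base_progression.length : Int)) 0
    let root_index : Int :=
      if chord_root ∈ scale then ((PySem.List.index? scale chord_root).getD 0 : Nat) else 0
    let note := PySem.List.pyGetD scale (PySem.Int.mod (root_index + step) (scale.length : Int)) 0 + 12 * 4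
    line ++ [(note, length)]) []

-- ===== PORT B =====
def make_counterpoint_alt (scale : List Int) (base_progression : List Int) (bars : Int) (step : Int) (length : Int) : List (Int × Int) :=
  if bars ≤ 0 then []
  else
    let index := (PySem.List.enumerate scale 0).foldl (fun d p => d.setdefault p.2 p.1) PySem.Dict.empty
    let n : Int := scale.length
    let period := base_progression.map (fun c =>
      (PySem.List.pyGetD scale (PySem.Int.mod (index.getD c 0 + step) n) 0 + 12 * 4, length))
    let q := PySem.Int.floordiv bars (base_progression.length : Int)
    let r := PySem.Int.mod bars (base_progression.length : Int)
    PySem.List.pyRepeat period q ++ PySem.List.slice period none (some r)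

-- ===== PRECONDITION & SPEC =====
-- Pre_ excludes exactly the inputs on which the Python A raises ZeroDivisionError:
-- bars > 0 with an empty scale or an empty base_progression.
def Pre_make_counterpoint (scale : List Int) (base_progression : List Int) (bars : Int) (step : Int) (length : Int) : Prop :=
  bars ≤ 0 ∨ (scale ≠ [] ∧ base_progression ≠ [])
instance (scale : List Int) (base_progression : List Int) (bars : Int) (step : Int) (length : Int) : Decidable (Pre_make_counterpoint scale base_progression bars step length) := by unfold Pre_make_counterpoint; infer_instance

def pvWitness_make_counterpoint : List Int × List Int × Int × Int × Int := ([0, 2, 4, 5, 7, 9, 11], [0, 5, 7], 8, 2, 4)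

def Spec_make_counterpoint (scale : List Int) (base_progression : List Int) (bars : Int) (step : Int) (length : Int) (out : List (Int × Int)) : Prop := out = make_counterpoint_alt scale base_progression bars step length
instance (scale : List Int) (base_progression : List Int) (bars : Int) (step : Int) (length : Int) (out : List (Int × Int)) : Decidable (Spec_make_counterpoint scale base_progression bars step length out) := by unfold Spec_make_counterpoint; infer_instance

-- ===== CLAIM (what is proved, stated in full; the proofs are below) =====
def Claim_equal_make_counterpoint : Prop := ∀ (scale : List Int) (base_progression : List Int) (bars : Int) (step : Int) (length : Int), Dom_make_counterpoint scale base_progression bars step length → Pre_make_counterpoint scale base_progression bars step length → Spec_make_counterpoint scale base_progression bars step length (make_counterpoint scale base_progression bars step length)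

-- ===== LEMMAS AND PROOFS =====

-- The setdefault loop over `enumerate scale s` records the FIRST index of each value:
-- looking it up agrees with scale.index / `in`.
theorem getdict_eq_index (scale : List Int) (s : Int) (d : PySem.Dict Int Int) (c : Int) :
    (((PySem.List.enumerate scale s).foldl (fun d p => d.setdefault p.2 p.1) d).get? c)
      = if d.contains c then d.get? c
        else (PySem.List.index? scale c).map (fun j : Nat => s + (j : Int)) := by
  induction scale generalizing s d with
  | nil =>
      rw [PySem.List.enumerate_nil, List.foldl_nil,
        (PySem.List.index?_eq_none_iff ([] : List Int) c).2 (by simp)]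
      by_cases hdc : d.contains c = true
      · simp [hdc]
      · simp only [Bool.not_eq_true] at hdc
        simp only [hdc, Bool.false_eq_true, if_false, Option.map_none]
        exact (PySem.Dict.get?_eq_none_iff_contains d c).2 hdc
  | cons x xs ih =>
      rw [PySem.List.enumerate_cons]
      simp only [List.foldl_cons]
      rw [ih]
      by_cases hxc : x = c
      · subst hxc
        rw [PySem.List.index?_cons_self]
        by_cases hdc : d.contains x = true
        · rw [PySem.Dict.setdefault_of_contains d s hdc]; simp [hdc]
        · rw [PySem.Dict.setdefault_of_not_contains d s (by simpa using hdc)]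
          simp [PySem.Dict.contains_insert_self, PySem.Dict.get?_insert_self, hdc]
      · rw [PySem.List.index?_cons_of_ne _ hxc, Option.map_map]
        have h1 : (d.setdefault x s).get? c = d.get? c := by
          by_cases hdx : d.contains x = true
          · rw [PySem.Dict.setdefault_of_contains d s hdx]
          · rw [PySem.Dict.setdefault_of_not_contains d s (by simpa using hdx),
              PySem.Dict.get?_insert_of_ne d s (Ne.symm hxc)]
        have h2 : (d.setdefault x s).contains c = d.contains c := by
          by_cases hdx : d.contains x = true
          · rw [PySem.Dict.setdefault_of_contains d s hdx]
          · rw [PySem.Dict.setdefault_of_not_contains d s (by simpa using hdx),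
              PySem.Dict.contains_insert]
            simp [Ne.symm hxc]
        rw [h1, h2]
        by_cases hdc : d.contains c = true
        · simp [hdc]
        · simp only [Bool.not_eq_true] at hdc
          simp only [hdc, Bool.false_eq_true, if_false]
          congr 1
          funext j
          simp only [Function.comp_apply]
          push_cast
          ring

-- index over range N with wrap-around index k % len xs equals tiling xs.
theorem map_getD_mod_range {α : Type} (d : α) (xs : List α) (hxs : xs ≠ []) (N : Nat) :
    (List.range N).map (fun k => xs.getD (k % xs.length) d)
      = (List.replicate (N / xs.length) xs).flatten ++ xs.take (N % xs.length) := by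
  induction N using Nat.strong_induction_on with
  | _ N ih =>
    have hm : 0 < xs.length := List.length_pos_iff.mpr hxs
    by_cases hN : N < xs.length
    · rw [Nat.div_eq_of_lt hN, Nat.mod_eq_of_lt hN]
      simp only [List.replicate_zero, List.flatten_nil, List.nil_append]
      -- map over range N with index < length: equals take N
      apply List.ext_getElem
      · simp [Nat.le_of_lt hN]
      · intro i h1 h2
        simp only [List.getElem_map, List.getElem_range, List.getElem_take]
        have hi : i < N := by simpa using h1
        rw [Nat.mod_eq_of_lt (lt_trans hi hN), List.getD_eq_getElem]
    · rw [not_lt] at hN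
      obtain ⟨K, hK⟩ : ∃ K, N = xs.length + K := ⟨N - xs.length, by omega⟩
      subst hK
      rw [List.range_add, List.map_append, List.map_map]
      have h1 : (List.range xs.length).map (fun k => xs.getD (k % xs.length) d) = xs := by
        apply List.ext_getElem
        · simp
        · intro i h1 h2
          simp only [List.getElem_map, List.getElem_range]
          rw [Nat.mod_eq_of_lt (by simpa using h1), List.getD_eq_getElem]
      have h2 : ((List.range K).map ((fun k => xs.getD (k % xs.length) d) ∘ (fun k => xs.length + k)))
          = (List.range K).map (fun k => xs.getD (k % xs.length) d) := by
        apply List.map_congr_left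
        intro k _
        simp [Nat.add_mod_left]
      rw [h1, h2, ih K (by omega)]
      have hdiv : (xs.length + K) / xs.length = K / xs.length + 1 := by
        rw [Nat.add_comm, Nat.add_div_right _ hm]
      have hmod : (xs.length + K) % xs.length = K % xs.length := Nat.add_mod_left _ _
      rw [hdiv, hmod, List.replicate_succ, List.flatten_cons, List.append_assoc]

-- ===== VERDICT =====
theorem make_counterpoint_spec : Claim_equal_make_counterpoint := by
  intro scale bp bars step length _ hpre
  unfold Spec_make_counterpoint make_counterpoint make_counterpoint_alt
  by_cases hb : bars ≤ 0
  · rw [PySem.List.pyRange_one_eq_nil hb]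
    simp [hb]
  · obtain ⟨hs, hp⟩ : scale ≠ [] ∧ bp ≠ [] := hpre.resolve_left hb
    rw [if_neg hb]
    set g : Int → Int × Int := fun c =>
      (PySem.List.pyGetD scale (PySem.Int.mod ((if c ∈ scale then (((PySem.List.index? scale c).getD 0 : Nat) : Int) else 0) + step) (scale.length : Int)) 0 + 12 * 4, length) with hg
    have hm : 0 < bp.length := List.length_pos_iff.mpr hp
    obtain ⟨N, hN⟩ : ∃ N : Nat, bars = (N : Int) := ⟨bars.toNat, by omega⟩
    -- A's loop is a map over the range
    have hA : (PySem.List.pyRange 0 bars 1).foldl (fun line i =>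
        let chord_root := PySem.List.pyGetD bp (PySem.Int.mod i (bp.length : Int)) 0
        let root_index : Int :=
          if chord_root ∈ scale then ((PySem.List.index? scale chord_root).getD 0 : Nat) else 0
        let note := PySem.List.pyGetD scale (PySem.Int.mod (root_index + step) (scale.length : Int)) 0 + 12 * 4
        line ++ [(note, length)]) []
        = (PySem.List.pyRange 0 bars 1).map (fun i => g (PySem.List.pyGetD bp (PySem.Int.mod i (bp.length : Int)) 0)) :=
      (PySem.List.foldl_append_singleton_eq_map
        (fun i => g (PySem.List.pyGetD bp (PySem.Int.mod i (bp.length : Int)) 0))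
        (PySem.List.pyRange 0 bars 1) []).trans (List.nil_append _)
    rw [hA]
    -- B's dict lookup agrees with A's root_index
    have hidx : ∀ c, (((PySem.List.enumerate scale 0).foldl (fun d p => d.setdefault p.2 p.1) PySem.Dict.empty).getD c 0)
        = (if c ∈ scale then (((PySem.List.index? scale c).getD 0 : Nat) : Int) else 0) := by
      intro c
      rw [PySem.Dict.getD_eq_get?_getD, getdict_eq_index]
      simp only [PySem.Dict.contains_empty, Bool.false_eq_true, if_false]
      by_cases hc : c ∈ scale
      · obtain ⟨j, hj⟩ := Option.isSome_iff_exists.mp ((PySem.List.index?_isSome_iff scale c).2 hc)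
        rw [hj, if_pos hc]
        simp
      · rw [(PySem.List.index?_eq_none_iff scale c).2 hc, if_neg hc]
        simp
    -- B computes the tiling of bp.map g
    have hB : (let index := (PySem.List.enumerate scale 0).foldl (fun d p => d.setdefault p.2 p.1) PySem.Dict.empty
        let n : Int := scale.length
        let period := bp.map (fun c =>
          (PySem.List.pyGetD scale (PySem.Int.mod (index.getD c 0 + step) n) 0 + 12 * 4, length))
        let q := PySem.Int.floordiv bars (bp.length : Int)
        let r := PySem.Int.mod bars (bp.length : Int)
        PySem.List.pyRepeat period q ++ PySem.List.slice period none (some r))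
        = (List.replicate (N / bp.length) (bp.map g)).flatten ++ (bp.map g).take (N % bp.length) := by
      show PySem.List.pyRepeat (bp.map _) (PySem.Int.floordiv bars (bp.length : Int)) ++
        PySem.List.slice (bp.map _) none (some (PySem.Int.mod bars (bp.length : Int))) = _
      have hper : bp.map (fun c =>
          (PySem.List.pyGetD scale (PySem.Int.mod ((((PySem.List.enumerate scale 0).foldl (fun d p => d.setdefault p.2 p.1) PySem.Dict.empty).getD c 0) + step) (scale.length : Int)) 0 + 12 * 4, length))
          = bp.map g := by
        apply List.map_congr_left
        intro c _
        rw [hidx c, hg]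
      rw [hper, hN, PySem.Int.floordiv_natCast N bp.length, PySem.Int.mod_natCast N bp.length,
        PySem.List.slice_to _ (by positivity)]
      simp only [PySem.List.pyRepeat]
      rfl
    rw [hB, hN, PySem.List.pyRange_zero_nat, List.map_map]
    have hA2 : (List.range N).map ((fun i => g (PySem.List.pyGetD bp (PySem.Int.mod i (bp.length : Int)) 0)) ∘ (fun k : Nat => (k : Int)))
        = (List.range N).map (fun k : Nat => g (bp.getD (k % bp.length) 0)) := by
      apply List.map_congr_left
      intro k _
      simp only [Function.comp_apply, PySem.Int.mod_natCast, PySem.List.pyGetD_natCast]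
    rw [hA2,
      show (fun k : Nat => g (bp.getD (k % bp.length) 0)) = g ∘ (fun k => bp.getD (k % bp.length) 0) from rfl,
      ← List.map_map, map_getD_mod_range (0 : Int) bp hp N,
      List.map_append, List.map_flatten, List.map_replicate, List.map_take]
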